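-- pv_equiv track=rewrite | github.com/Remco28/fencer-schedules | project_kickstart/app/services/fencer_validation_service.py | normalize_weapon_filter
-- ===== SOURCE A (Python) =====
-- from typing import Optional, Tuple
--
-- def normalize_weapon_filter(weapon_filter: Optional[str]) -> Optional[str]:
--     """
--     Normalize weapon filter to standard format.
--
--     Accepts: foil, epee, saber (case-insensitive)
--     Returns: Comma-separated lowercase string or None (deduplicated)
--     """
--     if not weapon_filter:
--         return None
--
--     # Split on commas and normalize each weapon (using set to deduplicate)
--     weapons = set()
--     valid_weapons = {"foil", "epee", "saber"}
--
--     for weapon in weapon_filter.split(","):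
--         weapon = weapon.strip().lower()
--         if weapon in valid_weapons:
--             weapons.add(weapon)
--
--     if not weapons:
--         return None
--
--     # Sort for consistency and join
--     return ",".join(sorted(weapons))
-- ===== SOURCE B (Python) =====
-- from typing import Optional
--
-- def normalize_weapon_filter(weapon_filter: Optional[str]) -> Optional[str]:
--     if not weapon_filter:
--         return None
--     # Single character-level pass: cut tokens at commas by hand, record each
--     # recognized weapon as a bit in a 3-bit mask, then emit via an 8-entry table.
--     mask = 0
--     token = []
--     for ch in weapon_filter + ",":
--         if ch == ",":
--             word = "".join(token).strip().lower()
--             if word == "epee":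
--                 mask |= 1
--             elif word == "foil":
--                 mask |= 2
--             elif word == "saber":
--                 mask |= 4
--             token = []
--         else:
--             token.append(ch)
--     return (None, "epee", "foil", "epee,foil", "saber",
--             "epee,saber", "foil,saber", "epee,foil,saber")[mask]
-- ===== Notes on version B (the rewrite author's own statement) =====
-- stated objective: alternative
-- what changed: B replaces A's split/set/sort pipeline by one hand-rolled character scan that cuts tokens at commas itself, records recognized weapons as bits of a 3-bit mask, and returns the answer from a fixed 8-entry lookup table, so no set, no sort and no join is performed.
import Mathlib
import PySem

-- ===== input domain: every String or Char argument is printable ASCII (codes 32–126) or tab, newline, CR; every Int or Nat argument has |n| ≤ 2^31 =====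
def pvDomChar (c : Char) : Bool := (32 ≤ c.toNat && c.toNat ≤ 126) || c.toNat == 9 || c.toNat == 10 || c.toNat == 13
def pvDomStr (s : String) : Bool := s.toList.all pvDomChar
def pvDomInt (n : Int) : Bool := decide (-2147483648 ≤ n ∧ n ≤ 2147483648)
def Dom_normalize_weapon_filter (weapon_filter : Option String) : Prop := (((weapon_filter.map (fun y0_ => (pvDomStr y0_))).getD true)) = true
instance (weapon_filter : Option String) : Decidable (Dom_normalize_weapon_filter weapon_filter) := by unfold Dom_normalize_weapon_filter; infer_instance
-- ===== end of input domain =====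

-- B replaces A's split/set/sort pipeline by one hand-rolled character scan that cuts tokens at
-- commas itself, sets a bit per recognized weapon in a 3-bit mask, and answers from a fixed
-- 8-entry table; objective: alternative (no set, no sort, no join).

-- ===== PORT A =====
def normalize_weapon_filter (weapon_filter : Option String) : Option String :=
  match weapon_filter with
  | none => none
  | some wf =>
    if wf = "" then none
    else
      let valid_weapons : PySem.Set String := PySem.Set.ofList ["foil", "epee", "saber"]
      let weapons : PySem.Set String :=
        ((PySem.Str.split? wf ",").getD []).foldl (fun acc w =>
          let weapon := PySem.Str.lower (PySem.Str.strip w)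
          if PySem.Set.contains valid_weapons weapon then PySem.Set.add acc weapon else acc)
          PySem.Set.empty
      if weapons = [] then none
      else some (PySem.Str.join "," (PySem.List.sorted weapons (fun x => x) false))

-- ===== PORT B =====
-- loop body of B's character scan: state = (mask, current token characters)
def nwfStep (st : Nat × List Char) (ch : Char) : Nat × List Char :=
  if ch = ',' then
    let word := PySem.Chars.lower (PySem.Chars.strip st.2)   -- "".join(token).strip().lower()
    if word = "epee".toList then (st.1 ||| 1, [])
    else if word = "foil".toList then (st.1 ||| 2, [])
    else if word = "saber".toList then (st.1 ||| 4, [])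
    else (st.1, [])
  else (st.1, st.2 ++ [ch])

-- B's final 8-entry lookup table (index = mask)
def nwfTable : List (Option String) :=
  [none, some "epee", some "foil", some "epee,foil", some "saber",
   some "epee,saber", some "foil,saber", some "epee,foil,saber"]

def normalize_weapon_filter_alt (weapon_filter : Option String) : Option String :=
  match weapon_filter with
  | none => none
  | some wf =>
    if wf = "" then none
    else
      let st := (wf.toList ++ [',']).foldl nwfStep (0, [])
      nwfTable.getD st.1 none

-- ===== PRECONDITION & SPEC =====
def Spec_normalize_weapon_filter (weapon_filter : Option String) (out : Option String) : Prop := out = normalize_weapon_filter_alt weapon_filter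
instance (weapon_filter : Option String) (out : Option String) : Decidable (Spec_normalize_weapon_filter weapon_filter out) := by unfold Spec_normalize_weapon_filter; infer_instance

-- ===== CLAIM (what is proved, stated in full; the proofs are below) =====
def Claim_equal_normalize_weapon_filter : Prop := ∀ (weapon_filter : Option String), Dom_normalize_weapon_filter weapon_filter → Spec_normalize_weapon_filter weapon_filter (normalize_weapon_filter weapon_filter)

-- ===== LEMMAS AND PROOFS =====

-- normalization of one raw token, on the char side
def normC (w : List Char) : List Char := PySem.Chars.lower (PySem.Chars.strip w)

-- ghost single-char comma splitter (proof-side only)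
def splitC : List Char → List (List Char)
  | [] => [[]]
  | c :: rest =>
    if c = ',' then [] :: splitC rest
    else match splitC rest with
      | [] => [[c]]
      | h :: t => (c :: h) :: t

def mh (p : List Char) : List (List Char) → List (List Char)
  | [] => []
  | h :: t => (p ++ h) :: t

lemma splitC_ne_nil (l : List Char) : splitC l ≠ [] := by
  cases l with
  | nil => simp [splitC]
  | cons c rest =>
    simp only [splitC]
    split <;> [simp; (split <;> simp)]

lemma go_eq (l : List Char) : ∀ (fuel : Nat) (cur : List Char) (acc : List (List Char)),
    l.length ≤ fuel →
    PySem.Chars.splitOn.go [','] fuel l cur acc = acc.reverse ++ mh cur.reverse (splitC l) := by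
  induction l with
  | nil =>
    intro fuel cur acc _
    cases fuel with
    | zero => simp [PySem.Chars.splitOn.go, splitC, mh]
    | succ n => simp [PySem.Chars.splitOn.go, splitC, mh]
  | cons c rest ih =>
    intro fuel cur acc hf
    cases fuel with
    | zero => simp at hf
    | succ n =>
      rw [PySem.Chars.splitOn.go]
      by_cases hc : c = ','
      · subst hc
        have hpre : List.isPrefixOf [','] (',' :: rest) = true := by simp [List.isPrefixOf]
        simp only [hpre, if_pos, List.length_cons, List.drop_succ_cons]
        simp only [List.length_nil, List.drop_zero]
        rw [ih n [] (cur.reverse :: acc) (by simpa using Nat.le_of_succ_le_succ hf)]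
        simp only [splitC, List.reverse_cons, List.reverse_nil, List.nil_append,
          List.append_assoc, mh, List.singleton_append]
        cases h : splitC rest with
        | nil => exact absurd h (splitC_ne_nil rest)
        | cons a b => simp
      · have hpre : List.isPrefixOf [','] (c :: rest) = false := by
          simp [List.isPrefixOf]; exact fun h => absurd h.symm hc
        simp only [hpre, Bool.false_eq_true, if_false]
        rw [ih n (c :: cur) acc (by simpa using Nat.le_of_succ_le_succ hf)]
        simp only [splitC, if_neg hc, List.reverse_cons]
        cases h : splitC rest with
        | nil => exact absurd h (splitC_ne_nil rest)
        | cons a b => simp [mh, List.append_assoc]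

lemma splitOn_eq_splitC (cs : List Char) : PySem.Chars.splitOn cs [','] = splitC cs := by
  rw [PySem.Chars.splitOn, go_eq cs (cs.length + 1) [] [] (Nat.le_succ _)]
  cases h : splitC cs with
  | nil => exact absurd h (splitC_ne_nil cs)
  | cons a b => simp [mh]

-- the bit B's branch chain records for one normalized word
def nwfBit (word : List Char) : Nat :=
  if word = "epee".toList then 1
  else if word = "foil".toList then 2
  else if word = "saber".toList then 4
  else 0

lemma nwfStep_comma (st : Nat × List Char) :
    nwfStep st ',' = (st.1 ||| nwfBit (normC st.2), []) := by
  unfold nwfStep nwfBit normC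
  simp only [if_pos]
  split_ifs <;> simp

-- B's scan over cs ++ [','] = a fold of nwfBit over the comma pieces of cs
lemma scan_eq (cs : List Char) : ∀ (m : Nat) (t : List Char),
    ((cs ++ [',']).foldl nwfStep (m, t)) =
      ((mh t (splitC cs)).foldl (fun m w => m ||| nwfBit (normC w)) m, []) := by
  induction cs with
  | nil =>
    intro m t
    simp only [List.nil_append, List.foldl_cons, List.foldl_nil, nwfStep_comma, splitC, mh,
      List.append_nil]
  | cons c rest ih =>
    intro m t
    by_cases hc : c = ','
    · subst hc
      simp only [List.cons_append, List.foldl_cons, nwfStep_comma, ih, splitC, mh]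
      cases h : splitC rest with
      | nil => exact absurd h (splitC_ne_nil rest)
      | cons a b => simp
    · have hstep : nwfStep (m, t) c = (m, t ++ [c]) := by
        unfold nwfStep; rw [if_neg hc]
      simp only [List.cons_append, List.foldl_cons, hstep, ih, splitC, if_neg hc]
      cases h : splitC rest with
      | nil => exact absurd h (splitC_ne_nil rest)
      | cons a b => simp [mh]

-- mask as a function of the three membership booleans
def maskOf3 (e f s : Bool) : Nat := (cond e 1 0) ||| (cond f 2 0) ||| (cond s 4 0)

lemma or_one (f s : Bool) : ∀ e, 1 ||| maskOf3 e f s = maskOf3 true f s := by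
  intro e; cases e <;> cases f <;> cases s <;> decide
lemma or_two (e s : Bool) : ∀ f, 2 ||| maskOf3 e f s = maskOf3 e true s := by
  intro f; cases e <;> cases f <;> cases s <;> decide
lemma or_four (e f : Bool) : ∀ s, 4 ||| maskOf3 e f s = maskOf3 e f true := by
  intro s; cases e <;> cases f <;> cases s <;> decide

lemma mask_fold (ws : List (List Char)) : ∀ m : Nat,
    ws.foldl (fun m w => m ||| nwfBit (normC w)) m =
      m ||| maskOf3 (decide ("epee".toList ∈ ws.map normC))
                    (decide ("foil".toList ∈ ws.map normC))
                    (decide ("saber".toList ∈ ws.map normC)) := by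
  induction ws with
  | nil => intro m; simp [maskOf3]
  | cons w ws ih =>
    intro m
    rw [List.foldl_cons, ih, Nat.or_assoc]
    congr 1
    simp only [List.map_cons, List.mem_cons, Bool.decide_or]
    unfold nwfBit
    by_cases he : normC w = "epee".toList
    · rw [if_pos he, he,
        (by decide : (decide ("epee".toList = "epee".toList)) = true),
        (by decide : (decide ("foil".toList = "epee".toList)) = false),
        (by decide : (decide ("saber".toList = "epee".toList)) = false),
        Bool.true_or, Bool.false_or, Bool.false_or, or_one]
    · rw [if_neg he]
      by_cases hf : normC w = "foil".toList
      · rw [if_pos hf, hf,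
          (by decide : (decide ("epee".toList = "foil".toList)) = false),
          (by decide : (decide ("foil".toList = "foil".toList)) = true),
          (by decide : (decide ("saber".toList = "foil".toList)) = false),
          Bool.true_or, Bool.false_or, Bool.false_or, or_two]
      · rw [if_neg hf]
        by_cases hs : normC w = "saber".toList
        · rw [if_pos hs, hs,
            (by decide : (decide ("epee".toList = "saber".toList)) = false),
            (by decide : (decide ("foil".toList = "saber".toList)) = false),
            (by decide : (decide ("saber".toList = "saber".toList)) = true),
            Bool.true_or, Bool.false_or, Bool.false_or, or_four]
        · rw [if_neg hs, Nat.zero_or,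
            (decide_eq_false (fun h => he h.symm) : (decide ("epee".toList = normC w)) = false),
            (decide_eq_false (fun h => hf h.symm) : (decide ("foil".toList = normC w)) = false),
            (decide_eq_false (fun h => hs h.symm) : (decide ("saber".toList = normC w)) = false),
            Bool.false_or, Bool.false_or, Bool.false_or]

-- ===== A-side lemmas (as in A's fold over the split pieces) =====
def pvIsValid (w : String) : Bool :=
  PySem.Set.contains (PySem.Set.ofList ["foil", "epee", "saber"]) w

def pvStepA (acc : PySem.Set String) (w : String) : PySem.Set String :=
  let weapon := PySem.Str.lower (PySem.Str.strip w)
  if pvIsValid weapon then PySem.Set.add acc weapon else acc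

lemma pvIsValid_iff (x : String) :
    pvIsValid x = true ↔ x = "foil" ∨ x = "epee" ∨ x = "saber" := by
  unfold pvIsValid
  rw [PySem.Set.contains_iff (PySem.Set.ofList ["foil", "epee", "saber"]) x]
  rw [PySem.Set.mem_ofList ["foil", "epee", "saber"] x]
  simp [List.mem_cons]

lemma mem_foldA (ts : List String) (acc : PySem.Set String) (x : String) :
    x ∈ ts.foldl pvStepA acc ↔
      x ∈ acc ∨ (pvIsValid x = true ∧
                 x ∈ ts.map (fun w => PySem.Str.lower (PySem.Str.strip w))) := by
  induction ts generalizing acc with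
  | nil => simp
  | cons t ts ih =>
    rw [List.foldl_cons, ih]
    show (x ∈ pvStepA acc t ∨ _) ↔ _
    unfold pvStepA
    rw [List.map_cons]
    by_cases h : pvIsValid (PySem.Str.lower (PySem.Str.strip t)) = true
    · rw [if_pos h, PySem.Set.mem_add, List.mem_cons]
      constructor
      · rintro ((ha | rfl) | ⟨hv, hw⟩)
        · exact Or.inl ha
        · exact Or.inr ⟨h, Or.inl rfl⟩
        · exact Or.inr ⟨hv, Or.inr hw⟩
      · rintro (ha | ⟨hv, (heq | hw)⟩)
        · exact Or.inl (Or.inl ha)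
        · exact Or.inl (Or.inr heq)
        · exact Or.inr ⟨hv, hw⟩
    · rw [if_neg h, List.mem_cons]
      constructor
      · rintro (ha | ⟨hv, hw⟩)
        · exact Or.inl ha
        · exact Or.inr ⟨hv, Or.inr hw⟩
      · rintro (ha | ⟨hv, (heq | hw)⟩)
        · exact Or.inl ha
        · exact absurd (heq ▸ hv) h
        · exact Or.inr ⟨hv, hw⟩

lemma nodup_foldA (ts : List String) (acc : PySem.Set String) (h : acc.Nodup) :
    (ts.foldl pvStepA acc).Nodup := by
  induction ts generalizing acc with
  | nil => exact h
  | cons t ts ih =>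
    rw [List.foldl_cons]
    refine ih _ ?_
    unfold pvStepA
    by_cases hc : pvIsValid (PySem.Str.lower (PySem.Str.strip t)) = true
    · rw [if_pos hc]
      exact PySem.Set.nodup_add _ _ h
    · rw [if_neg hc]
      exact h

-- the sorted valid-weapon list selected by the three booleans
def listOf3 (e f s : Bool) : List String :=
  (if e then ["epee"] else []) ++ (if f then ["foil"] else []) ++ (if s then ["saber"] else [])

lemma mem_listOf3 (e f s : Bool) (x : String) :
    x ∈ listOf3 e f s ↔ (x = "epee" ∧ e) ∨ (x = "foil" ∧ f) ∨ (x = "saber" ∧ s) := by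
  cases e <;> cases f <;> cases s <;> simp [listOf3]

lemma sublist_listOf3 (e f s : Bool) : (listOf3 e f s).Sublist ["epee", "foil", "saber"] := by
  cases e <;> cases f <;> cases s <;> decide

lemma pv_valid_pairwise : (["epee", "foil", "saber"] : List String).Pairwise (· < ·) := by
  have h1 : ("epee" : String) < "foil" := by rw [String.lt_iff_toList_lt]; decide
  have h2 : ("epee" : String) < "saber" := by rw [String.lt_iff_toList_lt]; decide
  have h3 : ("foil" : String) < "saber" := by rw [String.lt_iff_toList_lt]; decide
  rw [List.pairwise_cons, List.pairwise_cons]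
  refine ⟨?_, ?_, List.pairwise_singleton _ _⟩
  · intro b hb
    rcases List.mem_cons.mp hb with rfl | hb
    · exact h1
    · rcases List.mem_cons.mp hb with rfl | hb
      · exact h2
      · exact absurd hb (List.not_mem_nil)
  · intro b hb
    rcases List.mem_cons.mp hb with rfl | hb
    · exact h3
    · exact absurd hb (List.not_mem_nil)

-- ===== VERDICT (by name: the statement is the Claim_ definition above) =====
theorem normalize_weapon_filter_spec : Claim_equal_normalize_weapon_filter := by
  intro wf? _
  unfold Spec_normalize_weapon_filter normalize_weapon_filter normalize_weapon_filter_alt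
  match wf? with
  | none => rfl
  | some wf =>
    by_cases hemp : wf = ""
    · simp [hemp]
    · simp only [if_neg hemp]
      -- the split pieces, chars and strings
      set ps : List (List Char) := splitC wf.toList with hps
      have hsplit : (PySem.Str.split? wf ",").getD [] = ps.map String.ofList := by
        rw [PySem.Str.split?]
        have : PySem.Chars.split? wf.toList ",".toList = some (splitC wf.toList) := by
          rw [PySem.Chars.split?]
          simp [splitOn_eq_splitC]
        rw [this]; rfl
      -- B's side: mask via the pieces
      have hscan : (wf.toList ++ [',']).foldl nwfStep (0, []) =
          (ps.foldl (fun m w => m ||| nwfBit (normC w)) 0, []) := by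
        rw [scan_eq wf.toList 0 []]
        cases h : splitC wf.toList with
        | nil => exact absurd h (splitC_ne_nil _)
        | cons a b => simp [mh, hps, h]
      set e := decide ("epee".toList ∈ ps.map normC) with he
      set f := decide ("foil".toList ∈ ps.map normC) with hf
      set s := decide ("saber".toList ∈ ps.map normC) with hs
      have hmask : (wf.toList ++ [',']).foldl nwfStep (0, []) = (maskOf3 e f s, []) := by
        rw [hscan, mask_fold, Nat.zero_or]
      -- A's side
      set ts : List String := ps.map String.ofList with hts
      set weapons : PySem.Set String := ts.foldl pvStepA PySem.Set.empty with hweapons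
      have hchange : (((PySem.Str.split? wf ",").getD []).foldl (fun acc w =>
          let weapon := PySem.Str.lower (PySem.Str.strip w)
          if PySem.Set.contains (PySem.Set.ofList ["foil", "epee", "saber"]) weapon then
            PySem.Set.add acc weapon else acc) PySem.Set.empty) = weapons := by
        rw [hsplit]; rfl
      -- normalized string pieces vs normalized char pieces
      have hnorm : ∀ (x : String), x ∈ ts.map (fun w => PySem.Str.lower (PySem.Str.strip w)) ↔
          x.toList ∈ ps.map normC := by
        intro x
        rw [hts, List.map_map, List.mem_map, List.mem_map]
        constructor
        · rintro ⟨p, hp, rfl⟩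
          refine ⟨p, hp, ?_⟩
          simp [normC, PySem.Str.lower, PySem.Str.strip]
        · rintro ⟨p, hp, hpx⟩
          refine ⟨p, hp, ?_⟩
          apply String.toList_injective
          rw [← hpx]
          simp [normC, PySem.Str.lower, PySem.Str.strip]
      have hmemw : ∀ x, x ∈ weapons ↔
          (x = "epee" ∧ e = true) ∨ (x = "foil" ∧ f = true) ∨ (x = "saber" ∧ s = true) := by
        intro x
        rw [hweapons, mem_foldA]
        simp only [PySem.Set.empty, List.not_mem_nil, false_or]
        rw [pvIsValid_iff, hnorm]
        constructor
        · rintro ⟨(rfl | rfl | rfl), hin⟩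
          · exact Or.inr (Or.inl ⟨rfl, by rw [hf]; exact decide_eq_true hin⟩)
          · exact Or.inl ⟨rfl, by rw [he]; exact decide_eq_true hin⟩
          · exact Or.inr (Or.inr ⟨rfl, by rw [hs]; exact decide_eq_true hin⟩)
        · rintro (⟨rfl, hx⟩ | ⟨rfl, hx⟩ | ⟨rfl, hx⟩)
          · exact ⟨Or.inr (Or.inl rfl), of_decide_eq_true (he ▸ hx)⟩
          · exact ⟨Or.inl rfl, of_decide_eq_true (hf ▸ hx)⟩
          · exact ⟨Or.inr (Or.inr rfl), of_decide_eq_true (hs ▸ hx)⟩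
      have hnw : weapons.Nodup := nodup_foldA ts _ List.nodup_nil
      have hnl : (listOf3 e f s).Nodup :=
        (by decide : (["epee", "foil", "saber"] : List String).Nodup).sublist
          (sublist_listOf3 e f s)
      have hperm : (listOf3 e f s).Perm weapons := by
        refine (List.perm_ext_iff_of_nodup hnl hnw).mpr (fun x => ?_)
        rw [hmemw x, mem_listOf3]
      have hsorted : PySem.List.sorted weapons (fun x => x) false = listOf3 e f s :=
        PySem.List.sorted_eq_of_perm_of_pairwise_lt weapons (listOf3 e f s) (fun x => x) hperm
          (pv_valid_pairwise.sublist (sublist_listOf3 e f s))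
      have hempty : (weapons = []) ↔ (listOf3 e f s = []) := by
        constructor
        · intro h; exact List.Perm.eq_nil (h ▸ hperm)
        · intro h; exact List.Perm.nil_eq (h ▸ hperm) |>.symm
      rw [hchange, hmask, hsorted]
      clear_value e f s
      cases e <;> cases f <;> cases s <;>
        first
          | (rw [if_pos (hempty.mpr rfl)]; rfl)
          | (rw [if_neg (fun h => absurd (hempty.mp h) (by decide))]; rfl)
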